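-- pv_equiv track=rewrite | github.com/sanjith1999/PROBLEM_SOLVING | solvedPython/BridgeGame_1/main.py | seperate_links
-- ===== SOURCE A (Python) =====
-- def seperate_links(links):
--     Seperated=[]
--     for link in links:
--         # Handling no elements in Seperation
--         if not(Seperated):
--             Seperated.append(link.copy())
--         else:
--             #appending elements in seperated lists according to need
--             for i,seperation in enumerate(Seperated):
--                 # if first element of link in seperated list handle it according to the second element
--                 if link[0] in seperation:
--                     if link[1] in seperation:
--                         break;
--
--                     else:
--                         #seperating out the remaining list other than the considered one.
--                         remains=Seperated[:i]+Seperated[i+1:]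
--                         for remain in remains:
--                             if link[1] in remain:
--                                 Seperated[i]+=remain
--                                 Seperated.remove(remain)
--                                 break;
--                         else:
--                             Seperated[i].append(link[1])
--                     break;
--
--             else:
--                 for i,seperation in enumerate(Seperated):
--                     if link[1] in seperation:
--                         Seperated[i].append(link[0])
--                         break;
--                 else:
--                     Seperated.append(link.copy())
--     return Seperated
-- ===== SOURCE B (Python) =====
-- def seperate_links(links):
--     comp_of = {}   # element -> set of ids of the alive groups containing it
--     members = []   # group id -> member list, or None once absorbed by a merge
--     for link in links:
--         if not members:
--             for x in link:
--                 comp_of.setdefault(x, set()).add(len(members))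
--             members.append(link.copy())
--             continue
--         a, b = link[0], link[1]
--         ga = min(comp_of.get(a, ()), default=None)
--         if ga is not None:
--             if ga in comp_of.get(b, ()):
--                 continue
--             gb = min((g for g in comp_of.get(b, ()) if g != ga), default=None)
--             if gb is not None:
--                 for x in set(members[gb]):
--                     s = comp_of[x]
--                     s.discard(gb)
--                     s.add(ga)
--                 members[ga].extend(members[gb])
--                 members[gb] = None
--             else:
--                 members[ga].append(b)
--                 comp_of.setdefault(b, set()).add(ga)
--         else:
--             gb = min(comp_of.get(b, ()), default=None)
--             if gb is not None:
--                 members[gb].append(a)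
--                 comp_of.setdefault(a, set()).add(gb)
--             else:
--                 for x in link:
--                     comp_of.setdefault(x, set()).add(len(members))
--                 members.append(link.copy())
--     return [g for g in members if g is not None]
-- ===== Notes on version B (the rewrite author's own statement) =====
-- stated objective: faster
-- what changed: Replaces A's repeated linear scans over all groups per link with a hash map element->set-of-group-ids plus an append-only group table with tombstones (surviving groups stay in creation order, so A's first-matching group is exactly the minimal containing id), so each link is handled by dict lookups instead of scanning every group.
import Mathlib
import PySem

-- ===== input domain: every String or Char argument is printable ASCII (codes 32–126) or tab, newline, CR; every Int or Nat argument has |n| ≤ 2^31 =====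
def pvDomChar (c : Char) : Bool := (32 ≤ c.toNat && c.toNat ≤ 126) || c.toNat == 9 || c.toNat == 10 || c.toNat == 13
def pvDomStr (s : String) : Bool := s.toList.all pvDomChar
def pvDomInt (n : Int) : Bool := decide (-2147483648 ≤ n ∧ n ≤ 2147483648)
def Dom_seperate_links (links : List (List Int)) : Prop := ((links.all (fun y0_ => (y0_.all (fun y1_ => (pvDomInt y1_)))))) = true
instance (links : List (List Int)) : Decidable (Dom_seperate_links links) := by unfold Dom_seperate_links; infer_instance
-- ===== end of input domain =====

-- B groups link endpoints via a hash map element → set of containing group ids plus an append-only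
-- group table with tombstones (surviving groups keep creation order, so A's first-matching group is
-- the minimal containing id), replacing A's per-link linear scans over all groups; measured faster.

-- ===== PORT A =====
def firstIdxMem (x : Int) : List (List Int) → Option Nat
  | [] => none
  | s :: rest => if x ∈ s then some 0 else (firstIdxMem x rest).map (· + 1)

def firstMem (x : Int) : List (List Int) → Option (List Int)
  | [] => none
  | s :: rest => if x ∈ s then some s else firstMem x rest

def stepA (Sep : List (List Int)) (link : List Int) : List (List Int) :=
  if Sep = [] then [link]
  else
    let a := (PySem.List.pyGet? link 0).getD 0
    let b := (PySem.List.pyGet? link 1).getD 0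
    match firstIdxMem a Sep with
    | some i =>
      let sepi := Sep[i]?.getD []
      if b ∈ sepi then Sep
      else
        match firstMem b (Sep.take i ++ Sep.drop (i+1)) with
        | some remain =>
            (PySem.List.remove? (Sep.set i (sepi ++ remain)) remain).getD
              (Sep.set i (sepi ++ remain))
        | none => Sep.set i (sepi ++ [b])
    | none =>
      match firstIdxMem b Sep with
      | some j => Sep.set j ((Sep[j]?.getD []) ++ [a])
      | none => Sep ++ [link]

def seperate_links (links : List (List Int)) : List (List Int) :=
  links.foldl stepA []

-- ===== PORT B =====
def mget (ms : List (Option (List Int))) (g : Int) : List Int :=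
  (ms.getD g.toNat none).getD []

def stepB (st : PySem.Dict Int (PySem.Set Int) × List (Option (List Int))) (link : List Int) :
    PySem.Dict Int (PySem.Set Int) × List (Option (List Int)) :=
  let d := st.1
  let ms := st.2
  if ms = [] then
    (link.foldl (fun dd x => dd.modify x PySem.Set.empty
        (fun s => PySem.Set.add s (ms.length : Int))) d,
     ms ++ [some link])
  else
    let a := (PySem.List.pyGet? link 0).getD 0
    let b := (PySem.List.pyGet? link 1).getD 0
    let sa := d.getD a PySem.Set.empty
    let sb := d.getD b PySem.Set.empty
    match PySem.List.min? sa (fun g => g) with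
    | some ga =>
      if PySem.Set.contains sb ga then (d, ms)
      else
        match PySem.List.min? (sb.filter (fun g => g != ga)) (fun g => g) with
        | some gb =>
            ((PySem.Set.ofList (mget ms gb)).foldl
               (fun dd x => dd.modify x PySem.Set.empty
                  (fun s => PySem.Set.add (PySem.Set.discard s gb) ga)) d,
             (ms.set ga.toNat (some (mget ms ga ++ mget ms gb))).set gb.toNat none)
        | none =>
            (d.modify b PySem.Set.empty (fun s => PySem.Set.add s ga),
             ms.set ga.toNat (some (mget ms ga ++ [b])))
    | none =>
      match PySem.List.min? sb (fun g => g) with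
      | some gb =>
          (d.modify a PySem.Set.empty (fun s => PySem.Set.add s gb),
           ms.set gb.toNat (some (mget ms gb ++ [a])))
      | none =>
          (link.foldl (fun dd x => dd.modify x PySem.Set.empty
              (fun s => PySem.Set.add s (ms.length : Int))) d,
           ms ++ [some link])

def seperate_links_alt (links : List (List Int)) : List (List Int) :=
  ((links.foldl stepB (PySem.Dict.empty, [])).2).filterMap id

-- ===== PRECONDITION & SPEC =====
-- Pre_ is exactly A's domain: every link after the first must have at least two entries
-- (A indexes link[0] and link[1] there and raises IndexError otherwise; B also raises there).
def Pre_seperate_links (links : List (List Int)) : Prop :=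
  ∀ link ∈ links.drop 1, 2 ≤ link.length

instance (links : List (List Int)) : Decidable (Pre_seperate_links links) := by
  unfold Pre_seperate_links; infer_instance

def pvWitness_seperate_links : List (List Int) := [[1, 2], [3, 4], [2, 3]]

def Spec_seperate_links (links : List (List Int)) (out : List (List Int)) : Prop := out = seperate_links_alt links
instance (links : List (List Int)) (out : List (List Int)) : Decidable (Spec_seperate_links links out) := by unfold Spec_seperate_links; infer_instance

-- ===== CLAIM (what is proved, stated in full; the proofs are below) =====
def Claim_equal_seperate_links : Prop := ∀ (links : List (List Int)), Dom_seperate_links links → Pre_seperate_links links → Spec_seperate_links links (seperate_links links)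

-- ===== LEMMAS AND PROOFS =====
def posOf (ms : List (Option (List Int))) (n : Nat) : Nat :=
  ((ms.take n).filterMap id).length

def InvBA (d : PySem.Dict Int (PySem.Set Int)) (ms : List (Option (List Int))) : Prop :=
  (∀ (x : Int) (n : Nat), (∃ l, ms[n]? = some (some l) ∧ x ∈ l) ↔ (n : Int) ∈ d.getD x PySem.Set.empty)
  ∧ (∀ (x g : Int), g ∈ d.getD x PySem.Set.empty → ∃ n : Nat, g = (n : Int))
  ∧ (ms ≠ [] → ∃ (n : Nat) (l : List Int), ms[n]? = some (some l))

theorem FMget (ms : List (Option (List Int))) (n : Nat) (l : List Int)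
    (h : ms[n]? = some (some l)) : (ms.filterMap id)[posOf ms n]? = some l := by
  induction ms generalizing n with
  | nil => simp at h
  | cons o ms ih =>
    cases n with
    | zero => simp_all [posOf]
    | succ n =>
      simp only [List.getElem?_cons_succ] at h
      cases o with
      | none => simpa [posOf, List.filterMap_cons] using ih n h
      | some a => simpa [posOf, List.filterMap_cons] using ih n h

theorem FMset (ms : List (Option (List Int))) (n : Nat) (l l' : List Int)
    (h : ms[n]? = some (some l)) :
    (ms.set n (some l')).filterMap id = (ms.filterMap id).set (posOf ms n) l' := by
  induction ms generalizing n with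
  | nil => simp at h
  | cons o ms ih =>
    cases n with
    | zero => simp_all [posOf]
    | succ n =>
      simp only [List.getElem?_cons_succ] at h
      cases o with
      | none => simpa [posOf, List.filterMap_cons, List.set_cons_succ] using ih n h
      | some a => simpa [posOf, List.filterMap_cons, List.set_cons_succ] using ih n h

theorem FMdel (ms : List (Option (List Int))) (n : Nat) (l : List Int)
    (h : ms[n]? = some (some l)) :
    (ms.set n none).filterMap id = (ms.filterMap id).eraseIdx (posOf ms n) := by
  induction ms generalizing n with
  | nil => simp at h
  | cons o ms ih =>
    cases n with
    | zero => simp_all [posOf]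
    | succ n =>
      simp only [List.getElem?_cons_succ] at h
      cases o with
      | none => simpa [posOf, List.filterMap_cons, List.set_cons_succ] using ih n h
      | some a => simpa [posOf, List.filterMap_cons, List.set_cons_succ, List.eraseIdx_cons_succ] using ih n h

theorem FMsurj (ms : List (Option (List Int))) (i : Nat) (l : List Int)
    (h : (ms.filterMap id)[i]? = some l) :
    ∃ n, ms[n]? = some (some l) ∧ posOf ms n = i := by
  induction ms generalizing i with
  | nil => simp at h
  | cons o ms ih =>
    cases o with
    | none =>
      simp only [List.filterMap_cons] at h
      obtain ⟨n, hn, hp⟩ := ih i h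
      exact ⟨n+1, by simpa using hn, by simpa [posOf] using hp⟩
    | some a =>
      cases i with
      | zero =>
        simp only [List.filterMap_cons, List.getElem?_cons_zero, id] at h
        exact ⟨0, by simp [h], by simp [posOf]⟩
      | succ i =>
        simp only [List.filterMap_cons, List.getElem?_cons_succ, id] at h
        obtain ⟨n, hn, hp⟩ := ih i h
        exact ⟨n+1, by simpa using hn, by simpa [posOf] using hp⟩

theorem posOf_set (ms : List (Option (List Int))) (m : Nat) (l l' : List Int)
    (hm : ms[m]? = some (some l)) (n : Nat) :
    posOf (ms.set m (some l')) n = posOf ms n := by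
  induction ms generalizing m n with
  | nil => simp at hm
  | cons o ms ih =>
    cases m with
    | zero =>
      simp only [List.getElem?_cons_zero] at hm
      cases n <;> simp_all [posOf]
    | succ m =>
      simp only [List.getElem?_cons_succ] at hm
      cases n with
      | zero => simp [posOf]
      | succ n => cases o <;> simpa [posOf, List.set_cons_succ] using ih m hm n

theorem firstIdxMem_eq_none (x : Int) (L : List (List Int)) (h : ∀ l ∈ L, x ∉ l) :
    firstIdxMem x L = none := by
  induction L with
  | nil => rfl
  | cons s rest ih => simp_all [firstIdxMem]

theorem firstIdxMem_eq_some (x : Int) (L : List (List Int)) (i : Nat) (l : List Int)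
    (hi : L[i]? = some l) (hx : x ∈ l) (hfirst : ∀ j, j < i → ∀ l', L[j]? = some l' → x ∉ l') :
    firstIdxMem x L = some i := by
  induction L generalizing i with
  | nil => simp at hi
  | cons s rest ih =>
    cases i with
    | zero => simp at hi; subst hi; simp [firstIdxMem, hx]
    | succ i =>
      have hs : x ∉ s := hfirst 0 (by omega) s rfl
      simp only [List.getElem?_cons_succ] at hi
      simp [firstIdxMem, hs, ih i hi (fun j hj l' hl' => hfirst (j+1) (by omega) l' (by simpa using hl'))]

theorem firstMem_eq_none (x : Int) (L : List (List Int)) (h : ∀ l ∈ L, x ∉ l) :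
    firstMem x L = none := by
  induction L with
  | nil => rfl
  | cons s rest ih => simp_all [firstMem]

theorem remove?_eq_eraseIdx (L : List (List Int)) (v : List Int) (p : Nat)
    (hp : L[p]? = some v) (hfirst : ∀ j, j < p → L[j]? ≠ some v) :
    PySem.List.remove? L v = some (L.eraseIdx p) := by
  induction L generalizing p with
  | nil => simp at hp
  | cons s rest ih =>
    cases p with
    | zero => simp at hp; subst hp; simp
    | succ p =>
      have hs : s ≠ v := fun h => hfirst 0 (by omega) (by simp [h])
      simp only [List.getElem?_cons_succ] at hp
      rw [PySem.List.remove?_cons_of_ne rest hs, ih p hp (fun j hj => by simpa using hfirst (j+1) (by omega))]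
      simp

theorem mem_fm (ms : List (Option (List Int))) (l : List Int) :
    l ∈ ms.filterMap id ↔ ∃ n : Nat, ms[n]? = some (some l) := by
  rw [List.mem_filterMap]
  constructor
  · rintro ⟨o, ho, hol⟩
    simp only [id] at hol
    subst hol
    exact List.mem_iff_getElem?.1 ho
  · rintro ⟨n, hn⟩
    exact ⟨some l, List.mem_of_getElem? hn, rfl⟩



theorem posOf_mono (ms : List (Option (List Int))) (m n : Nat) (lm : List Int)
    (hm : ms[m]? = some (some lm)) (h : m < n) :
    posOf ms m < posOf ms n := by
  induction ms generalizing m n with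
  | nil => simp at hm
  | cons o ms ih =>
    cases m with
    | zero =>
      simp only [List.getElem?_cons_zero] at hm
      cases n with
      | zero => omega
      | succ n => simp_all [posOf]
    | succ m =>
      cases n with
      | zero => omega
      | succ n =>
        simp only [List.getElem?_cons_succ] at hm
        have := ih m n hm (by omega)
        cases o <;> simpa [posOf] using this

theorem posOf_le (ms : List (Option (List Int))) (m n : Nat) (lm : List Int)
    (hm : ms[m]? = some (some lm)) (h : m ≤ n) :
    posOf ms m ≤ posOf ms n := by
  rcases Nat.eq_or_lt_of_le h with h1 | h1
  · subst h1; exact le_refl _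
  · exact le_of_lt (posOf_mono ms m n lm hm h1)

theorem firstMem_eq_some_pos (x : Int) (L : List (List Int)) (c : List Int) (p : Nat)
    (hp : L[p]? = some c) (hx : x ∈ c)
    (hfirst : ∀ j, j < p → ∀ l', L[j]? = some l' → x ∉ l') :
    firstMem x L = some c := by
  induction L generalizing p with
  | nil => simp at hp
  | cons s rest ih =>
    cases p with
    | zero => simp at hp; subst hp; simp [firstMem, hx]
    | succ p =>
      have hs : x ∉ s := hfirst 0 (by omega) s rfl
      simp only [List.getElem?_cons_succ] at hp
      simp [firstMem, hs, ih p hp (fun j hj l' hl' => hfirst (j+1) (by omega) l' (by simpa using hl'))]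

theorem getElem?_remains (L : List (List Int)) (i : Nat) (hi : i < L.length) (j : Nat) :
    (L.take i ++ L.drop (i+1))[j]? = if j < i then L[j]? else L[j+1]? := by
  by_cases h : j < i
  · rw [List.getElem?_append_left (by simp; omega), if_pos h, List.getElem?_take_of_lt h]
  · rw [List.getElem?_append_right (by simp; omega), if_neg h]
    have hlen : (L.take i).length = i := by simp; omega
    rw [hlen, List.getElem?_drop]
    congr 1
    omega

theorem getD_foldl_modify_add (link : List Int) (L : Int)
    (d : PySem.Dict Int (PySem.Set Int)) (y g : Int) :
    g ∈ (link.foldl (fun dd x => dd.modify x PySem.Set.empty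
          (fun s => PySem.Set.add s L)) d).getD y PySem.Set.empty
      ↔ g ∈ d.getD y PySem.Set.empty ∨ (y ∈ link ∧ g = L) := by
  induction link generalizing d with
  | nil => simp
  | cons x link ih =>
    simp only [List.foldl_cons, ih, List.mem_cons]
    by_cases hyx : y = x
    · subst hyx
      rw [PySem.Dict.getD_modify_self]
      simp [PySem.Set.mem_add]
      tauto
    · rw [PySem.Dict.getD_modify_of_ne]
      · tauto
      · exact hyx

theorem getD_foldl_modify_relabel (S : List Int) (ga gb : Int) (hne : ga ≠ gb)
    (d : PySem.Dict Int (PySem.Set Int)) (y g : Int) :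
    g ∈ (S.foldl (fun dd x => dd.modify x PySem.Set.empty
          (fun s => PySem.Set.add (PySem.Set.discard s gb) ga)) d).getD y PySem.Set.empty
      ↔ (if y ∈ S then (g ∈ d.getD y PySem.Set.empty ∧ g ≠ gb) ∨ g = ga
         else g ∈ d.getD y PySem.Set.empty) := by
  induction S generalizing d with
  | nil => simp
  | cons x S ih =>
    simp only [List.foldl_cons, ih]
    have hCB : g = ga → ¬ g = gb := fun h1 h2 => hne (h1.symm.trans h2)
    by_cases hyx : y = x
    · subst hyx
      rw [PySem.Dict.getD_modify_self]
      have hmem : g ∈ PySem.Set.add (PySem.Set.discard (d.getD y PySem.Set.empty) gb) ga ↔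
          ((g ∈ d.getD y PySem.Set.empty ∧ ¬ g = gb) ∨ g = ga) := by
        simp [PySem.Set.mem_add, PySem.Set.mem_discard]
      rw [if_pos List.mem_cons_self]
      by_cases hyS : y ∈ S
      · rw [if_pos hyS, hmem]
        tauto
      · rw [if_neg hyS, hmem]
    · rw [PySem.Dict.getD_modify_of_ne]
      · by_cases hyS : y ∈ S
        · rw [if_pos hyS, if_pos (List.mem_cons.2 (Or.inr hyS))]
        · rw [if_neg hyS, if_neg (fun h => (List.mem_cons.1 h).elim hyx hyS)]
      · exact hyx

theorem stepA_cons (Sep : List (List Int)) (a b : Int) (rest : List Int) :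
    stepA Sep (a :: b :: rest) =
      if Sep = [] then [a :: b :: rest]
      else
        match firstIdxMem a Sep with
        | some i =>
          if b ∈ Sep[i]?.getD [] then Sep
          else
            match firstMem b (Sep.take i ++ Sep.drop (i+1)) with
            | some remain =>
                (PySem.List.remove? (Sep.set i ((Sep[i]?.getD []) ++ remain)) remain).getD
                  (Sep.set i ((Sep[i]?.getD []) ++ remain))
            | none => Sep.set i ((Sep[i]?.getD []) ++ [b])
        | none =>
          match firstIdxMem b Sep with
          | some j => Sep.set j ((Sep[j]?.getD []) ++ [a])
          | none => Sep ++ [a :: b :: rest] := by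
  have h0 : (PySem.List.pyGet? (a::b::rest) 0).getD 0 = a := by
    simp [PySem.List.pyGet?, PySem.List.pyIdx?, show ((0:Int) ≤ (rest.length:Int) + 1) from by omega]
  have h1 : (PySem.List.pyGet? (a::b::rest) 1).getD 0 = b := by
    simp [PySem.List.pyGet?, PySem.List.pyIdx?]
  simp only [stepA, h0, h1]

theorem stepB_open (d : PySem.Dict Int (PySem.Set Int)) (ms : List (Option (List Int)))
    (a b : Int) (rest : List Int) (hms : ms ≠ []) :
    stepB (d, ms) (a :: b :: rest) =
      (match PySem.List.min? (d.getD a PySem.Set.empty) (fun g => g) with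
       | some ga =>
         if PySem.Set.contains (d.getD b PySem.Set.empty) ga then (d, ms)
         else
           match PySem.List.min? ((d.getD b PySem.Set.empty).filter (fun g => g != ga)) (fun g => g) with
           | some gb =>
               ((PySem.Set.ofList (mget ms gb)).foldl
                  (fun dd x => dd.modify x PySem.Set.empty
                     (fun s => PySem.Set.add (PySem.Set.discard s gb) ga)) d,
                (ms.set ga.toNat (some (mget ms ga ++ mget ms gb))).set gb.toNat none)
           | none =>
               (d.modify b PySem.Set.empty (fun s => PySem.Set.add s ga),
                ms.set ga.toNat (some (mget ms ga ++ [b])))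
       | none =>
         match PySem.List.min? (d.getD b PySem.Set.empty) (fun g => g) with
         | some gb =>
             (d.modify a PySem.Set.empty (fun s => PySem.Set.add s gb),
              ms.set gb.toNat (some (mget ms gb ++ [a])))
         | none =>
             ((a :: b :: rest).foldl (fun dd x => dd.modify x PySem.Set.empty
                 (fun s => PySem.Set.add s (ms.length : Int))) d,
              ms ++ [some (a :: b :: rest)])) := by
  have h0 : (PySem.List.pyGet? (a::b::rest) 0).getD 0 = a := by
    simp [PySem.List.pyGet?, PySem.List.pyIdx?, show ((0:Int) ≤ (rest.length:Int) + 1) from by omega]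
  have h1 : (PySem.List.pyGet? (a::b::rest) 1).getD 0 = b := by
    simp [PySem.List.pyGet?, PySem.List.pyIdx?]
  simp only [stepB, if_neg hms, h0, h1]

theorem new_group_inv (d : PySem.Dict Int (PySem.Set Int)) (ms : List (Option (List Int)))
    (hd : ∀ (x : Int) (n : Nat), (∃ l, ms[n]? = some (some l) ∧ x ∈ l) ↔ (n : Int) ∈ d.getD x PySem.Set.empty)
    (hnn0 : ∀ (x g : Int), g ∈ d.getD x PySem.Set.empty → ∃ n : Nat, g = (n : Int))
    (link : List Int) :
    InvBA ((link.foldl (fun dd x => dd.modify x PySem.Set.empty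
        (fun s => PySem.Set.add s (ms.length : Int))) d)) (ms ++ [some link]) := by
  refine ⟨?_, ?_, ?_⟩
  · intro x n
    rw [getD_foldl_modify_add]
    constructor
    · rintro ⟨l, hnl, hxl⟩
      by_cases hlt : n < ms.length
      · rw [List.getElem?_append_left hlt] at hnl
        exact Or.inl ((hd x n).1 ⟨l, hnl, hxl⟩)
      · have hn' : n = ms.length := by
          by_contra hne'
          rw [List.getElem?_eq_none (by simp; omega)] at hnl
          simp at hnl
        subst hn'
        simp only [List.getElem?_concat_length] at hnl
        have hl : l = link := by simpa using hnl.symm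
        subst hl
        exact Or.inr ⟨hxl, rfl⟩
    · rintro (h | ⟨hxlink, hgl⟩)
      · obtain ⟨l, hnl, hxl⟩ := (hd x n).2 h
        have hlt : n < ms.length := (List.getElem?_eq_some_iff.1 hnl).1
        exact ⟨l, by rw [List.getElem?_append_left hlt]; exact hnl, hxl⟩
      · have hn' : n = ms.length := by exact_mod_cast hgl
        subst hn'
        exact ⟨link, by simp, hxlink⟩
  · intro x g hg
    rw [getD_foldl_modify_add] at hg
    rcases hg with h | ⟨_, h⟩
    · exact hnn0 x g h
    · exact ⟨ms.length, h⟩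
  · intro _
    exact ⟨ms.length, link, by simp⟩

theorem step_sim (d : PySem.Dict Int (PySem.Set Int)) (ms : List (Option (List Int)))
    (hInv : InvBA d ms) (link : List Int)
    (hlen : ms = [] ∨ 2 ≤ link.length) :
    stepA (ms.filterMap id) link = ((stepB (d, ms) link).2).filterMap id
    ∧ InvBA (stepB (d, ms) link).1 (stepB (d, ms) link).2
    ∧ (stepB (d, ms) link).2 ≠ [] := by
  obtain ⟨hd, hnn0, hAlive⟩ := hInv
  by_cases hms : ms = []
  · subst hms
    have hB : stepB (d, []) link =
        (link.foldl (fun dd x => dd.modify x PySem.Set.empty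
            (fun s => PySem.Set.add s ((0:Nat) : Int))) d, [some link]) := by
      simp [stepB]
    rw [hB]
    refine ⟨by simp [stepA], ?_, by simp⟩
    have := new_group_inv d [] hd hnn0 link
    simpa using this
  · -- ms nonempty: link has at least two elements
    have hlink2 : 2 ≤ link.length := hlen.resolve_left hms
    obtain ⟨a, t, rfl⟩ : ∃ a t, link = a :: t := by
      cases link with
      | nil => simp at hlink2
      | cons a t => exact ⟨a, t, rfl⟩
    obtain ⟨b, rest, rfl⟩ : ∃ b rest, t = b :: rest := by
      cases t with
      | nil => simp at hlink2
      | cons b rest => exact ⟨b, rest, rfl⟩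
    have hSep : List.filterMap id ms ≠ [] := by
      obtain ⟨n, l, hn⟩ := hAlive hms
      intro h
      have := FMget ms n l hn
      rw [h] at this
      simp at this
    have hmemS : ∀ (x : Int) (n : Nat) (l : List Int), ms[n]? = some (some l) → x ∈ l →
        (n : Int) ∈ d.getD x PySem.Set.empty := by
      intro x n l hn hx
      exact (hd x n).1 ⟨l, hn, hx⟩
    have hS2G : ∀ (x g : Int), g ∈ d.getD x PySem.Set.empty →
        ∃ n : Nat, g = (n : Int) ∧ ∃ l, ms[n]? = some (some l) ∧ x ∈ l := by
      intro x g hg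
      obtain ⟨n, rfl⟩ := hnn0 x g hg
      obtain ⟨l, hl, hx⟩ := (hd x n).2 hg
      exact ⟨n, rfl, l, hl, hx⟩
    have hminNone : ∀ x : Int, PySem.List.min? (d.getD x PySem.Set.empty) (fun g => g) = none →
        ∀ l ∈ List.filterMap id ms, x ∉ l := by
      intro x hmin l hl hx
      obtain ⟨n, hn⟩ := (mem_fm ms l).1 hl
      have := hmemS x n l hn hx
      rw [(PySem.List.min?_eq_none_iff _ _).1 hmin] at this
      simp at this
    have hminSome : ∀ (x g : Int), PySem.List.min? (d.getD x PySem.Set.empty) (fun g => g) = some g →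
        ∃ n0 : Nat, g = (n0 : Int) ∧ ∃ l0, ms[n0]? = some (some l0) ∧ x ∈ l0 ∧
          firstIdxMem x (List.filterMap id ms) = some (posOf ms n0) := by
      intro x g hmin
      have hgmem : g ∈ d.getD x PySem.Set.empty := PySem.List.min?_mem hmin
      have hmin' := PySem.List.min?_isMin hmin
      obtain ⟨n0, rfl, l0, hn0, hx0⟩ := hS2G x g hgmem
      refine ⟨n0, rfl, l0, hn0, hx0, ?_⟩
      refine firstIdxMem_eq_some x _ _ l0 (FMget ms n0 l0 hn0) hx0 ?_
      intro j hj l' hl' hxl'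
      obtain ⟨n', hn', hpn'⟩ := FMsurj ms j l' hl'
      have hin : (n' : Int) ∈ d.getD x PySem.Set.empty := hmemS x n' l' hn' hxl'
      have hle : ((n0 : Int)) ≤ ((n' : Int)) := hmin' _ hin
      have hle' : n0 ≤ n' := by exact_mod_cast hle
      have := posOf_le ms n0 n' l0 hn0 hle'
      omega
    have hmget : ∀ (n : Nat) (l : List Int), ms[n]? = some (some l) → mget ms ((n:Nat) : Int) = l := by
      intro n l hn
      simp [mget, List.getD_eq_getElem?_getD, hn]
    have hnelen : ∀ (ms' : List (Option (List Int))) (n : Nat) (v : Option (List Int)), ms' = ms.set n v → ms' ≠ [] := by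
      intro ms' n v h hnil
      rw [h] at hnil
      have := congrArg List.length hnil
      simp at this
      exact hms this
    rcases hga : PySem.List.min? (d.getD a PySem.Set.empty) (fun g => g) with _ | ga
    · rcases hgb : PySem.List.min? (d.getD b PySem.Set.empty) (fun g => g) with _ | gb
      · -- both endpoints fresh: new group from the whole link
        have hB : stepB (d, ms) (a :: b :: rest) =
            ((a :: b :: rest).foldl (fun dd x => dd.modify x PySem.Set.empty
                (fun s => PySem.Set.add s (ms.length : Int))) d,
             ms ++ [some (a :: b :: rest)]) := by
          rw [stepB_open d ms a b rest hms, hga, hgb]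
        have h1 : firstIdxMem a (List.filterMap id ms) = none :=
          firstIdxMem_eq_none _ _ (hminNone a hga)
        have h2 : firstIdxMem b (List.filterMap id ms) = none :=
          firstIdxMem_eq_none _ _ (hminNone b hgb)
        have hA : stepA (List.filterMap id ms) (a :: b :: rest) =
            List.filterMap id ms ++ [a :: b :: rest] := by
          rw [stepA_cons, if_neg hSep, h1, h2]
        rw [hA, hB]
        exact ⟨by simp, new_group_inv d ms hd hnn0 (a :: b :: rest), by simp⟩
      · -- a fresh, b in a group: append a to b's first group
        obtain ⟨nb, hgbn, lb, hnb, hblb, hfb⟩ := hminSome b gb hgb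
        subst hgbn
        have hab : a ≠ b := fun h => by rw [h, hgb] at hga; cases hga
        have haF : ∀ (g : Int), g ∉ d.getD a PySem.Set.empty := by
          intro g hg
          rw [(PySem.List.min?_eq_none_iff _ _).1 hga] at hg
          simp at hg
        have hnblt : nb < ms.length := (List.getElem?_eq_some_iff.1 hnb).1
        have hB : stepB (d, ms) (a :: b :: rest) =
            (d.modify a PySem.Set.empty (fun s => PySem.Set.add s (((nb:Nat)) : Int)),
             ms.set nb (some (lb ++ [a]))) := by
          rw [stepB_open d ms a b rest hms, hga, hgb]
          simp [hmget nb lb hnb]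
        have h1 : firstIdxMem a (List.filterMap id ms) = none :=
          firstIdxMem_eq_none _ _ (hminNone a hga)
        have hA : stepA (List.filterMap id ms) (a :: b :: rest) =
            (List.filterMap id ms).set (posOf ms nb) (((List.filterMap id ms)[posOf ms nb]?.getD []) ++ [a]) := by
          rw [stepA_cons, if_neg hSep, h1, hfb]
        rw [hA, hB]
        refine ⟨?_, ⟨?_, ?_, ?_⟩, hnelen _ nb (some (lb ++ [a])) rfl⟩
        · rw [FMget ms nb lb hnb, FMset ms nb lb (lb ++ [a]) hnb]
          rfl
        · intro x n
          by_cases hxa : x = a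
          · rw [hxa, PySem.Dict.getD_modify_self, PySem.Set.mem_add]
            constructor
            · rintro ⟨l, hnl, hxl⟩
              rw [List.getElem?_set] at hnl
              by_cases hnn : nb = n
              · subst hnn
                right
                rfl
              · rw [if_neg hnn] at hnl
                exact absurd ((hd a n).1 ⟨l, hnl, hxl⟩) (haF _)
            · rintro (h | h)
              · exact absurd h (haF _)
              · have hn' : n = nb := by exact_mod_cast h
                subst hn'
                exact ⟨lb ++ [a], by rw [List.getElem?_set, if_pos rfl, if_pos hnblt], by simp⟩
          · rw [PySem.Dict.getD_modify_of_ne _ _ _ hxa]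
            constructor
            · rintro ⟨l, hnl, hxl⟩
              rw [List.getElem?_set] at hnl
              by_cases hnn : nb = n
              · subst hnn
                rw [if_pos rfl, if_pos hnblt] at hnl
                have hl : l = lb ++ [a] := by simpa using hnl.symm
                subst hl
                have hxlb : x ∈ lb := by
                  rcases List.mem_append.1 hxl with h | h
                  · exact h
                  · exact absurd (by simpa using h) hxa
                exact (hd x nb).1 ⟨lb, hnb, hxlb⟩
              · rw [if_neg hnn] at hnl
                exact (hd x n).1 ⟨l, hnl, hxl⟩
            · intro h
              obtain ⟨l, hnl, hxl⟩ := (hd x n).2 h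
              by_cases hnn : nb = n
              · subst hnn
                have hl : l = lb := by rw [hnl] at hnb; simpa using hnb
                subst hl
                exact ⟨l ++ [a], by rw [List.getElem?_set, if_pos rfl, if_pos hnblt], by simp [hxl]⟩
              · exact ⟨l, by rw [List.getElem?_set, if_neg hnn]; exact hnl, hxl⟩
        · intro x g hg
          by_cases hxa : x = a
          · rw [hxa, PySem.Dict.getD_modify_self, PySem.Set.mem_add] at hg
            rcases hg with h | h
            · exact hnn0 a g h
            · exact ⟨nb, h⟩
          · rw [PySem.Dict.getD_modify_of_ne _ _ _ hxa] at hg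
            exact hnn0 x g hg
        · intro _
          exact ⟨nb, lb ++ [a], by rw [List.getElem?_set, if_pos rfl, if_pos hnblt]⟩
    · -- a is in a group
      obtain ⟨na, hgan, la, hna, hala, hfa⟩ := hminSome a ga hga
      subst hgan
      have hnalt : na < ms.length := (List.getElem?_eq_some_iff.1 hna).1
      have hgetDa : (List.filterMap id ms)[posOf ms na]?.getD [] = la := by
        rw [FMget ms na la hna]
        rfl
      by_cases hcont : PySem.Set.contains (d.getD b PySem.Set.empty) ((na : Nat) : Int) = true
      · -- b in the same group: nothing changes
        have hbmem := (PySem.Set.contains_iff _ _).1 hcont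
        obtain ⟨n', hn'eq, l', hl', hb'⟩ := hS2G b _ hbmem
        have hn' : n' = na := by exact_mod_cast hn'eq.symm
        subst hn'
        have hl : l' = la := by rw [hl'] at hna; simpa using hna
        subst hl
        have hB : stepB (d, ms) (a :: b :: rest) = (d, ms) := by
          rw [stepB_open d ms a b rest hms, hga]
          simp only [hcont, if_true]
        have hA : stepA (List.filterMap id ms) (a :: b :: rest) = List.filterMap id ms := by
          rw [stepA_cons, if_neg hSep, hfa]
          simp only [hgetDa]
          rw [if_pos hb']
        rw [hA, hB]
        exact ⟨rfl, ⟨hd, hnn0, hAlive⟩, hms⟩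
      · -- b not in a's group
        have hbla : b ∉ la := fun hx => hcont ((PySem.Set.contains_iff _ _).2 (hmemS b na la hna hx))
        have hcontF : PySem.Set.contains (d.getD b PySem.Set.empty) (((na:Nat)) : Int) = false := by
          revert hcont
          cases PySem.Set.contains (d.getD b PySem.Set.empty) (((na:Nat)) : Int) <;> simp
        rcases hgb2 : PySem.List.min? ((d.getD b PySem.Set.empty).filter (fun g => g != (((na:Nat)) : Int))) (fun g => g) with _ | gb
        · -- b in no other group: append b to a's group
          have hbF : ∀ l ∈ List.filterMap id ms, b ∉ l := by
            intro l hl hx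
            obtain ⟨n', hn'⟩ := (mem_fm ms l).1 hl
            have hin := hmemS b n' l hn' hx
            have heq : ((n' : Nat) : Int) = ((na : Nat) : Int) := by
              by_contra hne'
              have hmem2 : ((n' : Nat) : Int) ∈ (d.getD b PySem.Set.empty).filter
                  (fun g => g != (((na : Nat)) : Int)) := by
                simp only [List.mem_filter]
                exact ⟨hin, by simp [hne']⟩
              rw [(PySem.List.min?_eq_none_iff _ _).1 hgb2] at hmem2
              simp at hmem2
            rw [heq] at hin
            exact hcont ((PySem.Set.contains_iff _ _).2 hin)
          have hbFset : ∀ (g : Int), g ∉ d.getD b PySem.Set.empty := by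
            intro g hg
            obtain ⟨n', rfl, l, hl, hbl⟩ := hS2G b g hg
            exact hbF l ((mem_fm ms l).2 ⟨n', hl⟩) hbl
          have hFM : firstMem b ((List.filterMap id ms).take (posOf ms na) ++
              (List.filterMap id ms).drop (posOf ms na + 1)) = none := by
            refine firstMem_eq_none _ _ ?_
            intro l hl
            rcases List.mem_append.1 hl with h | h
            · exact hbF l (List.mem_of_mem_take h)
            · exact hbF l (List.mem_of_mem_drop h)
          have hB : stepB (d, ms) (a :: b :: rest) =
              (d.modify b PySem.Set.empty (fun s => PySem.Set.add s (((na:Nat)) : Int)),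
               ms.set na (some (la ++ [b]))) := by
            rw [stepB_open d ms a b rest hms, hga]
            simp only [hcontF, Bool.false_eq_true, if_false]
            rw [hgb2]
            simp [hmget na la hna]
          have hA : stepA (List.filterMap id ms) (a :: b :: rest) =
              (List.filterMap id ms).set (posOf ms na) (la ++ [b]) := by
            rw [stepA_cons, if_neg hSep, hfa]
            simp only [hgetDa]
            rw [if_neg hbla, hFM]
          rw [hA, hB]
          refine ⟨?_, ⟨?_, ?_, ?_⟩, hnelen _ na (some (la ++ [b])) rfl⟩
          · rw [FMset ms na la (la ++ [b]) hna]
          · intro x n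
            by_cases hxb : x = b
            · rw [hxb, PySem.Dict.getD_modify_self, PySem.Set.mem_add]
              constructor
              · rintro ⟨l, hnl, hxl⟩
                rw [List.getElem?_set] at hnl
                by_cases hnn : na = n
                · subst hnn
                  right
                  rfl
                · rw [if_neg hnn] at hnl
                  exact absurd ((hd b n).1 ⟨l, hnl, hxl⟩) (hbFset _)
              · rintro (h | h)
                · exact absurd h (hbFset _)
                · have hn' : n = na := by exact_mod_cast h
                  subst hn'
                  exact ⟨la ++ [b], by rw [List.getElem?_set, if_pos rfl, if_pos hnalt], by simp⟩
            · rw [PySem.Dict.getD_modify_of_ne _ _ _ hxb]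
              constructor
              · rintro ⟨l, hnl, hxl⟩
                rw [List.getElem?_set] at hnl
                by_cases hnn : na = n
                · subst hnn
                  rw [if_pos rfl, if_pos hnalt] at hnl
                  have hl : l = la ++ [b] := by simpa using hnl.symm
                  subst hl
                  have hxla : x ∈ la := by
                    rcases List.mem_append.1 hxl with h | h
                    · exact h
                    · exact absurd (by simpa using h) hxb
                  exact (hd x na).1 ⟨la, hna, hxla⟩
                · rw [if_neg hnn] at hnl
                  exact (hd x n).1 ⟨l, hnl, hxl⟩
              · intro h
                obtain ⟨l, hnl, hxl⟩ := (hd x n).2 h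
                by_cases hnn : na = n
                · subst hnn
                  have hl : l = la := by rw [hnl] at hna; simpa using hna
                  subst hl
                  exact ⟨l ++ [b], by rw [List.getElem?_set, if_pos rfl, if_pos hnalt], by simp [hxl]⟩
                · exact ⟨l, by rw [List.getElem?_set, if_neg hnn]; exact hnl, hxl⟩
          · intro x g hg
            by_cases hxb : x = b
            · rw [hxb, PySem.Dict.getD_modify_self, PySem.Set.mem_add] at hg
              rcases hg with h | h
              · exact hnn0 b g h
              · exact ⟨na, h⟩
            · rw [PySem.Dict.getD_modify_of_ne _ _ _ hxb] at hg
              exact hnn0 x g hg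
          · intro _
            exact ⟨na, la ++ [b], by rw [List.getElem?_set, if_pos rfl, if_pos hnalt]⟩
        · -- b in another group: merge it into a's group
          have hgbfil := PySem.List.min?_mem hgb2
          rw [List.mem_filter] at hgbfil
          have hminb := PySem.List.min?_isMin hgb2
          obtain ⟨nb, hgbn, lb, hnb, hblb⟩ := hS2G b gb hgbfil.1
          subst hgbn
          have hnn : na ≠ nb := by
            intro h
            subst h
            simp at hgbfil
          have hneab : (((na:Nat)) : Int) ≠ ((nb : Nat) : Int) := fun h => hnn (by exact_mod_cast h)
          have hnblt : nb < ms.length := (List.getElem?_eq_some_iff.1 hnb).1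
          have hpi : posOf ms nb ≠ posOf ms na := by
            rcases Nat.lt_trichotomy na nb with h | h | h
            · have := posOf_mono ms na nb la hna h
              omega
            · exact absurd h hnn
            · have := posOf_mono ms nb na lb hnb h
              omega
          have hi : posOf ms na < (List.filterMap id ms).length :=
            (List.getElem?_eq_some_iff.1 (FMget ms na la hna)).1
          have hbuniq : ∀ (j : Nat) (l' : List Int), j ≠ posOf ms na →
              (List.filterMap id ms)[j]? = some l' → b ∈ l' → posOf ms nb ≤ j := by
            intro j l' hji hjv hbl
            obtain ⟨n', hn', hp'⟩ := FMsurj ms j l' hjv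
            have hin : ((n' : Nat) : Int) ∈ d.getD b PySem.Set.empty := hmemS b n' l' hn' hbl
            have hnena : ((n' : Nat) : Int) ≠ ((na : Nat) : Int) := by
              intro h
              apply hji
              have h2 : n' = na := by exact_mod_cast h
              rw [← hp', h2]
            have hinf : ((n' : Nat) : Int) ∈ (d.getD b PySem.Set.empty).filter
                (fun g => g != (((na:Nat)) : Int)) := by
              simp only [List.mem_filter]
              exact ⟨hin, by simp [hnena]⟩
            have hle : ((nb : Nat) : Int) ≤ ((n' : Nat) : Int) := hminb _ hinf
            have hle' : nb ≤ n' := by exact_mod_cast hle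
            calc posOf ms nb ≤ posOf ms n' := posOf_le ms nb n' lb hnb hle'
            _ = j := hp'
          have hfm : firstMem b ((List.filterMap id ms).take (posOf ms na) ++
              (List.filterMap id ms).drop (posOf ms na + 1)) = some lb := by
            by_cases hplt : posOf ms nb < posOf ms na
            · refine firstMem_eq_some_pos b _ lb (posOf ms nb) ?_ hblb ?_
              · rw [getElem?_remains _ _ hi, if_pos hplt]
                exact FMget ms nb lb hnb
              · intro j hj l' hl' hbl
                rw [getElem?_remains _ _ hi, if_pos (by omega)] at hl'
                have := hbuniq j l' (by omega) hl' hbl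
                omega
            · have hpgt : posOf ms na < posOf ms nb := by omega
              refine firstMem_eq_some_pos b _ lb (posOf ms nb - 1) ?_ hblb ?_
              · rw [getElem?_remains _ _ hi, if_neg (by omega)]
                have : posOf ms nb - 1 + 1 = posOf ms nb := by omega
                rw [this]
                exact FMget ms nb lb hnb
              · intro j hj l' hl' hbl
                rw [getElem?_remains _ _ hi] at hl'
                by_cases hji : j < posOf ms na
                · rw [if_pos hji] at hl'
                  have := hbuniq j l' (by omega) hl' hbl
                  omega
                · rw [if_neg hji] at hl'
                  have := hbuniq (j+1) l' (by omega) hl' hbl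
                  omega
          have hsetp : ((List.filterMap id ms).set (posOf ms na) (la ++ lb))[posOf ms nb]? = some lb := by
            rw [List.getElem?_set, if_neg (Ne.symm hpi)]
            exact FMget ms nb lb hnb
          have hrem : PySem.List.remove? ((List.filterMap id ms).set (posOf ms na) (la ++ lb)) lb
              = some (((List.filterMap id ms).set (posOf ms na) (la ++ lb)).eraseIdx (posOf ms nb)) := by
            refine remove?_eq_eraseIdx _ lb (posOf ms nb) hsetp ?_
            intro j hj hjv
            rw [List.getElem?_set] at hjv
            by_cases hji : posOf ms na = j
            · rw [if_pos hji] at hjv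
              split_ifs at hjv
              have h2 : la ++ lb = lb := by simpa using hjv
              have h3 := congrArg List.length h2
              simp at h3
              rw [h3] at hala
              simp at hala
            · rw [if_neg hji] at hjv
              have := hbuniq j lb (fun h => hji h.symm) hjv hblb
              omega
          have hA : stepA (List.filterMap id ms) (a :: b :: rest) =
              ((List.filterMap id ms).set (posOf ms na) (la ++ lb)).eraseIdx (posOf ms nb) := by
            rw [stepA_cons, if_neg hSep, hfa]
            simp only [hgetDa]
            rw [if_neg hbla, hfm]
            simp only [hrem, Option.getD_some]
          have hB : stepB (d, ms) (a :: b :: rest) =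
              ((PySem.Set.ofList lb).foldl
                 (fun dd x => dd.modify x PySem.Set.empty
                    (fun s => PySem.Set.add (PySem.Set.discard s ((nb:Nat) : Int)) ((na:Nat) : Int))) d,
               (ms.set na (some (la ++ lb))).set nb none) := by
            rw [stepB_open d ms a b rest hms, hga]
            simp only [hcontF, Bool.false_eq_true, if_false]
            rw [hgb2]
            simp [hmget na la hna, hmget nb lb hnb]
          rw [hA, hB]
          have hms2nb : (ms.set na (some (la ++ lb)))[nb]? = some (some lb) := by
            rw [List.getElem?_set, if_neg hnn]
            exact hnb
          have hms' : ∀ n : Nat, ((ms.set na (some (la ++ lb))).set nb none)[n]? =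
              if nb = n then (if n < ms.length then some none else none)
              else if na = n then some (some (la ++ lb))
              else ms[n]? := by
            intro n
            rw [List.getElem?_set, List.getElem?_set]
            by_cases h1 : nb = n
            · simp [h1]
            · rw [if_neg h1, if_neg h1]
              by_cases h2 : na = n
              · subst h2
                simp [hnalt]
              · rw [if_neg h2, if_neg h2]
          refine ⟨?_, ⟨?_, ?_, ?_⟩, ?_⟩
          · rw [FMdel (ms.set na (some (la ++ lb))) nb lb hms2nb,
                FMset ms na la (la ++ lb) hna,
                posOf_set ms na la (la ++ lb) hna nb]
          · intro x n
            rw [getD_foldl_modify_relabel _ _ _ hneab, hms' n]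
            by_cases hxlb : x ∈ PySem.Set.ofList lb
            · rw [if_pos hxlb]
              have hxlb' : x ∈ lb := (PySem.Set.mem_ofList _ _).1 hxlb
              by_cases hnb_ : nb = n
              · subst hnb_
                rw [if_pos rfl, if_pos hnblt]
                constructor
                · rintro ⟨l, hl, _⟩
                  exact absurd hl (by simp)
                · rintro (⟨_, h2⟩ | h1)
                  · exact absurd rfl h2
                  · exact absurd (by exact_mod_cast h1 : nb = na) (Ne.symm hnn)
              · rw [if_neg hnb_]
                by_cases hna_ : na = n
                · subst hna_
                  rw [if_pos rfl]
                  constructor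
                  · intro _
                    right
                    rfl
                  · intro _
                    exact ⟨la ++ lb, rfl, List.mem_append_right la hxlb'⟩
                · rw [if_neg hna_]
                  constructor
                  · rintro ⟨l, hl, hxl⟩
                    left
                    refine ⟨(hd x n).1 ⟨l, hl, hxl⟩, ?_⟩
                    intro h
                    exact hnb_ (by exact_mod_cast h.symm)
                  · rintro (⟨h1, _⟩ | h1)
                    · exact (hd x n).2 h1
                    · exact absurd (by exact_mod_cast h1 : n = na) (fun h => hna_ h.symm)
            · rw [if_neg hxlb]
              have hxlb' : x ∉ lb := fun h => hxlb ((PySem.Set.mem_ofList _ _).2 h)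
              by_cases hnb_ : nb = n
              · subst hnb_
                rw [if_pos rfl, if_pos hnblt]
                constructor
                · rintro ⟨l, hl, _⟩
                  exact absurd hl (by simp)
                · intro h1
                  obtain ⟨l, hl, hxl⟩ := (hd x nb).2 h1
                  have hle : l = lb := by rw [hl] at hnb; simpa using hnb
                  exact absurd (hle ▸ hxl) hxlb'
              · rw [if_neg hnb_]
                by_cases hna_ : na = n
                · subst hna_
                  rw [if_pos rfl]
                  constructor
                  · rintro ⟨l, hl, hxl⟩
                    have hle : l = la ++ lb := by simpa using hl.symm
                    subst hle
                    rcases List.mem_append.1 hxl with h | h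
                    · exact (hd x na).1 ⟨la, hna, h⟩
                    · exact absurd h hxlb'
                  · intro h1
                    obtain ⟨l, hl, hxl⟩ := (hd x na).2 h1
                    have hle : l = la := by rw [hl] at hna; simpa using hna
                    subst hle
                    exact ⟨l ++ lb, rfl, List.mem_append_left lb hxl⟩
                · rw [if_neg hna_]
                  exact hd x n
          · intro x g hg
            rw [getD_foldl_modify_relabel _ _ _ hneab] at hg
            by_cases hxlb : x ∈ PySem.Set.ofList lb
            · rw [if_pos hxlb] at hg
              rcases hg with ⟨h1, _⟩ | h1
              · exact hnn0 x g h1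
              · exact ⟨na, h1⟩
            · rw [if_neg hxlb] at hg
              exact hnn0 x g hg
          · intro _
            exact ⟨na, la ++ lb, by rw [hms' na, if_neg (fun h => hnn h.symm), if_pos rfl]⟩
          · intro hnil
            have h := congrArg List.length hnil
            simp at h
            exact hms h



theorem InvBA_init : InvBA PySem.Dict.empty [] := by
  have hempty : ∀ x : Int, (PySem.Dict.empty : PySem.Dict Int (PySem.Set Int)).getD x PySem.Set.empty = PySem.Set.empty := fun _ => rfl
  refine ⟨fun x n => ?_, fun x g hg => ?_, fun h => absurd rfl h⟩
  · constructor
    · rintro ⟨l, hl, _⟩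
      simp at hl
    · intro h
      rw [hempty x] at h
      simp [PySem.Set.empty] at h
  · rw [hempty x] at hg
    simp [PySem.Set.empty] at hg

theorem foldl_sim (links : List (List Int)) (h2 : ∀ l ∈ links, 2 ≤ l.length) :
    ∀ (d : PySem.Dict Int (PySem.Set Int)) (ms : List (Option (List Int))), InvBA d ms →
    links.foldl stepA (ms.filterMap id) = ((links.foldl stepB (d, ms)).2).filterMap id := by
  induction links with
  | nil => intro d ms _; rfl
  | cons link rest ih =>
    intro d ms hInv
    obtain ⟨hv, hI, _⟩ := step_sim d ms hInv link (Or.inr (h2 link (by simp)))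
    rw [List.foldl_cons, List.foldl_cons, hv]
    have h3 := ih (fun l hl => h2 l (by simp [hl])) (stepB (d, ms) link).1 (stepB (d, ms) link).2 hI
    simpa using h3

theorem final_eq (links : List (List Int)) (hpre : ∀ link ∈ links.drop 1, 2 ≤ link.length) :
    links.foldl stepA [] = ((links.foldl stepB (PySem.Dict.empty, [])).2).filterMap id := by
  cases links with
  | nil => rfl
  | cons l rest =>
    rw [List.foldl_cons, List.foldl_cons]
    obtain ⟨hv, hI, _⟩ := step_sim PySem.Dict.empty [] InvBA_init l (Or.inl rfl)
    have hv' : stepA [] l = ((stepB (PySem.Dict.empty, []) l).2).filterMap id := hv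
    rw [hv']
    have h3 := foldl_sim rest (fun l' hl' => hpre l' (by simpa using hl'))
      (stepB (PySem.Dict.empty, []) l).1 (stepB (PySem.Dict.empty, []) l).2 hI
    simpa using h3

-- ===== VERDICT (by name: the statement is the Claim_ definition above) =====
theorem seperate_links_spec : Claim_equal_seperate_links := by
  intro links _ hpre
  unfold Spec_seperate_links seperate_links seperate_links_alt
  exact final_eq links hpre
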